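-- pv_equiv track=rewrite | github.com/Hunan-tiger/Machine-Learning-Codes | bayes_琦智哥.py | class_separate
-- ===== SOURCE A (Python) =====
-- def class_separate(data_set):#对数据进行处理，分类并统计
--     separated_data = {}
--     data_info = {}#表示的是各品种花所对应的数量
--     for data in data_set:
--         if data[-1] not in separated_data:#创建新字典索引，data和info两个字典都各自有三个索引，即花的品种
--             separated_data[data[-1]] = []
--             data_info[data[-1]] = 0
--         separated_data[data[-1]].append(data)#将所有花分成三类，每种花都会被添加进对应的花类别中
--         data_info[data[-1]] += 1
--     if 'Species' in separated_data:
--         del separated_data['Species']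
--     if 'Species' in data_info:
--         del data_info['Species']
--     return separated_data, data_info
-- ===== SOURCE B (Python) =====
-- def class_separate(data_set):
--     labels = []
--     for row in data_set:
--         if row[-1] not in labels:
--             labels.append(row[-1])
--     separated_data = {k: [row for row in data_set if row[-1] == k]
--                       for k in labels if k != 'Species'}
--     data_info = {k: len(v) for k, v in separated_data.items()}
--     return separated_data, data_info
-- ===== Notes on version B (the rewrite author's own statement) =====
-- stated objective: alternative
-- what changed: B replaces A's single-pass dict-with-inline-counter accumulation by a two-phase algorithm: one pass collects the distinct class labels in first-occurrence order, then each group is produced by a separate filter scan of the whole dataset per label (skipping 'Species'), with counts derived as group lengths; no dict is mutated during traversal.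
import Mathlib
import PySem

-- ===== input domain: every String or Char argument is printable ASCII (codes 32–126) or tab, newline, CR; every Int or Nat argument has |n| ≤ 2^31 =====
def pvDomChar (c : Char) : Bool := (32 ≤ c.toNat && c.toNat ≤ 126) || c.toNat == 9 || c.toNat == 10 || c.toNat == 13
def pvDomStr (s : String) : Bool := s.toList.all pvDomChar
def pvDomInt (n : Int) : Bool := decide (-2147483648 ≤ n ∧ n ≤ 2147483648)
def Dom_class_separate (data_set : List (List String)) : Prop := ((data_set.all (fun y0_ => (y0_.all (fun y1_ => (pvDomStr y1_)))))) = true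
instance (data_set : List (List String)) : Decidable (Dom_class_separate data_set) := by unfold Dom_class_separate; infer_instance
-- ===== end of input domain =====

-- B is a two-phase algorithm: one pass collects distinct labels in first-occurrence order,
-- then groups are built by a filter scan per label (skipping 'Species') and counts are group
-- lengths; return value only (A/B take fresh row lists).


-- ===== PORT A =====
def class_separate (data_set : List (List String)) : (List (String × List (List String))) × (List (String × Int)) :=
  let st := data_set.foldl
    (fun (st : PySem.Dict String (List (List String)) × PySem.Dict String Int) data =>
      let k := (PySem.List.pyGet? data (-1)).getD ""   -- data[-1]; Pre_ excludes empty rows (IndexError)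
      let st := if st.1.contains k then st else (st.1.insert k [], st.2.insert k 0)
      (st.1.modify k [] (fun l => l ++ [data]), st.2.modify k 0 (fun n => n + 1)))
    (PySem.Dict.empty, PySem.Dict.empty)
  let sep := if st.1.contains "Species" then st.1.erase "Species" else st.1
  let info := if st.2.contains "Species" then st.2.erase "Species" else st.2
  (sep.items, info.items)

-- ===== PORT B =====
def class_separate_alt (data_set : List (List String)) : (List (String × List (List String))) × (List (String × Int)) :=
  -- pass 1: distinct class labels in first-occurrence order
  let labels := data_set.foldl
    (fun (acc : List String) row =>
      let k := (PySem.List.pyGet? row (-1)).getD ""   -- row[-1]; Pre_ excludes empty rows (IndexError)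
      if k ∈ acc then acc else acc ++ [k]) []
  -- pass 2: one filter scan per label, skipping 'Species'
  let sep := (labels.filter (fun k => k ≠ "Species")).map
    (fun k => (k, data_set.filter (fun row => ((PySem.List.pyGet? row (-1)).getD "") == k)))
  let info := sep.map (fun p => (p.1, (p.2.length : Int)))
  (sep, info)

-- ===== PRECONDITION & SPEC =====
-- Pre_ excludes inputs containing an empty row, on which both Pythons raise IndexError at data[-1].
def Pre_class_separate (data_set : List (List String)) : Prop := ∀ data ∈ data_set, data ≠ []
instance (data_set : List (List String)) : Decidable (Pre_class_separate data_set) := by unfold Pre_class_separate; infer_instance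
def pvWitness_class_separate : List (List String) := [["1", "a"], ["2", "b"], ["3", "a"], ["x", "Species"]]
def Spec_class_separate (data_set : List (List String)) (out : (List (String × List (List String))) × (List (String × Int))) : Prop := out = class_separate_alt data_set
instance (data_set : List (List String)) (out : (List (String × List (List String))) × (List (String × Int))) : Decidable (Spec_class_separate data_set out) := by unfold Spec_class_separate; infer_instance

-- ===== CLAIM (what is proved, stated in full; the proofs are below) =====
def Claim_equal_class_separate : Prop := ∀ (data_set : List (List String)), Dom_class_separate data_set → Pre_class_separate data_set → Spec_class_separate data_set (class_separate data_set)

-- ===== LEMMAS AND PROOFS =====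

-- the last-element key of a row
def pvKey (row : List String) : String := (PySem.List.pyGet? row (-1)).getD ""

-- value-to-length projection linking the two returned dicts
def pvLen (p : String × List (List String)) : String × Int := (p.1, (p.2.length : Int))

-- the invariant: A's counter dict is the pointwise length image of its grouping dict
def pvInv (d : PySem.Dict String (List (List String))) (e : PySem.Dict String Int) : Prop :=
  e.items = d.items.map pvLen

theorem get?_map_pvLen (its : List (String × List (List String))) (x : String) :
    (PySem.Dict.mk (its.map pvLen)).get? x = ((PySem.Dict.mk its).get? x).map (fun v => (v.length : Int)) := by
  induction its with
  | nil => simp [PySem.Dict.get?]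
  | cons p rest ih =>
      rcases p with ⟨k, v⟩
      simp only [List.map_cons, pvLen, PySem.Dict.get?_mk_cons]
      by_cases h : k = x <;> simp [h, ih]

theorem contains_of_inv {d : PySem.Dict String (List (List String))} {e : PySem.Dict String Int}
    (h : pvInv d e) (x : String) : e.contains x = d.contains x := by
  rcases d with ⟨dits⟩; rcases e with ⟨eits⟩
  unfold pvInv at h; simp only at h; subst h
  rw [PySem.Dict.contains_eq_isSome_get?, PySem.Dict.contains_eq_isSome_get?, get?_map_pvLen]
  cases (PySem.Dict.mk dits).get? x <;> simp

theorem getD_of_inv {d : PySem.Dict String (List (List String))} {e : PySem.Dict String Int}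
    (h : pvInv d e) (x : String) (hc : d.contains x = true) :
    e.getD x 0 = ((d.getD x []).length : Int) := by
  rcases d with ⟨dits⟩; rcases e with ⟨eits⟩
  unfold pvInv at h; simp only at h; subst h
  rw [PySem.Dict.contains_eq_isSome_get?] at hc
  rw [PySem.Dict.getD_eq_get?_getD, PySem.Dict.getD_eq_get?_getD, get?_map_pvLen]
  cases hg : (PySem.Dict.mk dits).get? x with
  | none => rw [hg] at hc; simp at hc
  | some v => simp

-- one step of A's loop: the grouping component equals the plain modify step, invariant preserved
theorem step_eq {d : PySem.Dict String (List (List String))} {e : PySem.Dict String Int}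
    (h : pvInv d e) (data : List String) :
    (let k := (PySem.List.pyGet? data (-1)).getD ""
     let st := if d.contains k then (d, e) else (d.insert k [], e.insert k 0)
     ((st.1.modify k [] (fun l => l ++ [data]), st.2.modify k 0 (fun n => n + 1)) :
       PySem.Dict String (List (List String)) × PySem.Dict String Int))
    = (d.modify ((PySem.List.pyGet? data (-1)).getD "") [] (fun l => l ++ [data]),
       e.modify ((PySem.List.pyGet? data (-1)).getD "") 0 (fun n => n + 1)) ∧
    pvInv (d.modify ((PySem.List.pyGet? data (-1)).getD "") [] (fun l => l ++ [data]))
        (e.modify ((PySem.List.pyGet? data (-1)).getD "") 0 (fun n => n + 1)) := by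
  set k := (PySem.List.pyGet? data (-1)).getD "" with hk
  by_cases hc : d.contains k = true
  · refine ⟨by simp [hc], ?_⟩
    have hce : e.contains k = true := by rw [contains_of_inv h, hc]
    unfold pvInv PySem.Dict.modify
    rw [PySem.Dict.items_insert_of_contains _ _ hc, PySem.Dict.items_insert_of_contains _ _ hce]
    have hitems : e.items = d.items.map pvLen := h
    rw [hitems]
    simp only [List.map_map]
    apply List.map_congr_left
    intro p _
    by_cases hp : p.1 = k
    · simp [pvLen, hp, getD_of_inv h k hc]
    · simp [pvLen, hp]
  · have hcf : d.contains k = false := by simpa using hc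
    have hce : e.contains k = false := by rw [contains_of_inv h, hcf]
    constructor
    · simp only []
      rw [if_neg hc]
      refine Prod.ext ?_ ?_
      · show (d.insert k []).modify k [] (fun l => l ++ [data]) = _
        unfold PySem.Dict.modify
        rw [PySem.Dict.insert_insert_self, PySem.Dict.getD_insert_self,
            PySem.Dict.getD_of_not_contains _ _ hcf]
      · show (e.insert k 0).modify k 0 (fun n => n + 1) = _
        unfold PySem.Dict.modify
        rw [PySem.Dict.insert_insert_self, PySem.Dict.getD_insert_self,
            PySem.Dict.getD_of_not_contains _ _ hce]
    · unfold pvInv PySem.Dict.modify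
      rw [PySem.Dict.getD_of_not_contains _ _ hcf, PySem.Dict.getD_of_not_contains _ _ hce]
      rw [PySem.Dict.items_insert_of_not_contains _ _ hcf, PySem.Dict.items_insert_of_not_contains _ _ hce]
      have hitems : e.items = d.items.map pvLen := h
      rw [hitems]
      simp [pvLen]

-- the whole loop: A's fold equals (the plain modify fold, its length image)
theorem fold_eq (l : List (List String)) (d : PySem.Dict String (List (List String)))
    (e : PySem.Dict String Int) (h : pvInv d e) :
    (l.foldl
      (fun (st : PySem.Dict String (List (List String)) × PySem.Dict String Int) data =>
        let k := (PySem.List.pyGet? data (-1)).getD ""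
        let st := if st.1.contains k then st else (st.1.insert k [], st.2.insert k 0)
        (st.1.modify k [] (fun l => l ++ [data]), st.2.modify k 0 (fun n => n + 1)))
      (d, e)).1
      = l.foldl (fun d data =>
          d.modify ((PySem.List.pyGet? data (-1)).getD "") [] (fun l => l ++ [data])) d ∧
    pvInv (l.foldl (fun d data =>
          d.modify ((PySem.List.pyGet? data (-1)).getD "") [] (fun l => l ++ [data])) d)
        (l.foldl
      (fun (st : PySem.Dict String (List (List String)) × PySem.Dict String Int) data =>
        let k := (PySem.List.pyGet? data (-1)).getD ""
        let st := if st.1.contains k then st else (st.1.insert k [], st.2.insert k 0)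
        (st.1.modify k [] (fun l => l ++ [data]), st.2.modify k 0 (fun n => n + 1)))
      (d, e)).2 := by
  induction l generalizing d e with
  | nil => exact ⟨rfl, h⟩
  | cons data rest ih =>
      obtain ⟨hstep, hinv⟩ := step_eq h data
      simp only [List.foldl_cons]
      simp only [] at hstep ⊢
      rw [hstep]
      exact ih _ _ hinv

-- erasing a key absent from the dict is the identity
theorem erase_of_not_contains (d : PySem.Dict String (List (List String)))
    (k : String) (h : d.contains k = false) : d.erase k = d := by
  have hnone : d.get? k = none := by
    rw [PySem.Dict.contains_eq_isSome_get?] at h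
    cases hg : d.get? k with
    | none => rfl
    | some v => rw [hg] at h; simp at h
  have hnk : k ∉ d.keys := (PySem.Dict.get?_eq_none_iff_not_mem_keys _ _).mp hnone
  rcases d with ⟨its⟩
  unfold PySem.Dict.erase
  simp only [PySem.Dict.mk.injEq]
  apply List.filter_eq_self.mpr
  intro p hp
  have : p.1 ∈ (PySem.Dict.mk its).keys := by
    simp only [PySem.Dict.keys]
    exact List.mem_map_of_mem hp
  simp only [Bool.not_eq_eq_eq_not, Bool.not_true]
  rw [beq_eq_false_iff_ne]
  intro hpe
  exact hnk (hpe ▸ this)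

-- the same, for the Int-valued counter dict
theorem erase_of_not_contains_int (d : PySem.Dict String Int)
    (k : String) (h : d.contains k = false) : d.erase k = d := by
  have hnone : d.get? k = none := by
    rw [PySem.Dict.contains_eq_isSome_get?] at h
    cases hg : d.get? k with
    | none => rfl
    | some v => rw [hg] at h; simp at h
  have hnk : k ∉ d.keys := (PySem.Dict.get?_eq_none_iff_not_mem_keys _ _).mp hnone
  rcases d with ⟨its⟩
  unfold PySem.Dict.erase
  simp only [PySem.Dict.mk.injEq]
  apply List.filter_eq_self.mpr
  intro p hp
  have : p.1 ∈ (PySem.Dict.mk its).keys := by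
    simp only [PySem.Dict.keys]
    exact List.mem_map_of_mem hp
  simp only [Bool.not_eq_eq_eq_not, Bool.not_true]
  rw [beq_eq_false_iff_ne]
  intro hpe
  exact hnk (hpe ▸ this)

-- pvInv is preserved by erasing the same key from both dicts
theorem inv_erase {d : PySem.Dict String (List (List String))} {e : PySem.Dict String Int}
    (h : pvInv d e) (k : String) : pvInv (d.erase k) (e.erase k) := by
  rcases d with ⟨dits⟩; rcases e with ⟨eits⟩
  have hitems : eits = dits.map pvLen := h
  subst hitems
  unfold pvInv PySem.Dict.erase
  simp only
  rw [List.filter_map]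
  congr 1

-- B's label loop is set-of-keys accumulation
theorem labels_eq (l : List (List String)) :
    l.foldl (fun (acc : List String) row =>
        let k := (PySem.List.pyGet? row (-1)).getD ""
        if k ∈ acc then acc else acc ++ [k]) []
      = PySem.Set.ofList (l.map pvKey) := by
  rw [PySem.Set.ofList, List.foldl_map]
  apply List.foldl_ext
  intro acc row hr
  simp [PySem.Set.add_eq_ite, pvKey]

-- the modify fold's items are the labels paired with filter scans
theorem modify_fold_items (l : List (List String)) :
    (l.foldl (fun d data =>
        d.modify ((PySem.List.pyGet? data (-1)).getD "") [] (fun v => v ++ [data]))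
      (PySem.Dict.empty : PySem.Dict String (List (List String)))).items
    = (PySem.Set.ofList (l.map pvKey)).map
        (fun k => (k, l.filter (fun row => pvKey row == k))) := by
  have hshow : (l.foldl (fun d data =>
        d.modify ((PySem.List.pyGet? data (-1)).getD "") [] (fun v => v ++ [data]))
      (PySem.Dict.empty : PySem.Dict String (List (List String))))
      = l.foldl (fun d data => d.modify (pvKey data) [] (fun v => v ++ [data])) PySem.Dict.empty := rfl
  rw [hshow]
  set g := l.foldl (fun d data => d.modify (pvKey data) [] (fun v => v ++ [data])) PySem.Dict.empty with hg
  have hnd : g.keys.Nodup := by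
    rw [hg]
    exact PySem.Dict.nodup_keys_foldl_modify_key l pvKey [] (fun d data v => v ++ [data]) PySem.Dict.empty (by simp)
  have hkeys : g.keys = PySem.Set.ofList (l.map pvKey) := by
    rw [hg, PySem.Dict.keys_foldl_modify_key]
    simp [PySem.Set.update_nil_left]
  have hgetD : ∀ k, g.getD k [] = l.filter (fun row => pvKey row == k) := by
    intro k
    have hmap : g = (l.map (fun row => (pvKey row, row))).foldl
        (fun d p => d.modify p.1 [] (fun v => v ++ [p.2])) PySem.Dict.empty := by
      rw [hg, List.foldl_map]
    rw [hmap, PySem.Dict.getD_foldl_modify_append, PySem.Dict.getD_empty, List.filter_map,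
        List.map_map]
    simp only [Function.comp_def, List.map_id_fun', List.nil_append]
    rfl
  rw [PySem.Dict.items_eq_map_keys g hnd [], hkeys]
  apply List.map_congr_left
  intro k _
  rw [hgetD k]

-- erase is a filter on the items list
theorem items_erase (d : PySem.Dict String (List (List String))) (k : String) :
    (d.erase k).items = d.items.filter (fun p => !(p.1 == k)) := by
  rcases d with ⟨its⟩; rfl

-- ===== VERDICT (by name: the statement is the Claim_ definition above) =====
theorem class_separate_spec : Claim_equal_class_separate := by
  intro data_set _ _
  unfold Spec_class_separate
  have hfil : ∀ L : List String,
      L.filter (fun k => decide (k ≠ "Species")) = L.filter (fun k => !(k == "Species")) := by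
    intro L
    apply List.filter_congr
    intro k _
    simp only [decide_not, Bool.not_inj_iff]
    exact Eq.symm (Bool.beq_eq_decide_eq k "Species")
  have hB : class_separate_alt data_set
      = (((PySem.Set.ofList (data_set.map pvKey)).filter (fun k => !(k == "Species"))).map
            (fun k => (k, data_set.filter (fun row => pvKey row == k))),
         (((PySem.Set.ofList (data_set.map pvKey)).filter (fun k => !(k == "Species"))).map
            (fun k => (k, data_set.filter (fun row => pvKey row == k)))).map pvLen) := by
    unfold class_separate_alt
    simp only
    rw [labels_eq data_set, hfil]
    rfl
  rw [hB]
  unfold class_separate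
  simp only
  obtain ⟨hfst, hinv⟩ := fold_eq data_set PySem.Dict.empty PySem.Dict.empty (by rfl)
  set stA := data_set.foldl
      (fun (st : PySem.Dict String (List (List String)) × PySem.Dict String Int) data =>
        let k := (PySem.List.pyGet? data (-1)).getD ""
        let st := if st.1.contains k then st else (st.1.insert k [], st.2.insert k 0)
        (st.1.modify k [] (fun l => l ++ [data]), st.2.modify k 0 (fun n => n + 1)))
      (PySem.Dict.empty, PySem.Dict.empty) with hstA
  set g := data_set.foldl (fun d data =>
        d.modify ((PySem.List.pyGet? data (-1)).getD "") [] (fun l => l ++ [data]))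
      PySem.Dict.empty with hg
  have hinvA : pvInv stA.1 stA.2 := by rw [hfst]; exact hinv
  have hsep : (if stA.1.contains "Species" then stA.1.erase "Species" else stA.1)
      = g.erase "Species" := by
    by_cases hc : stA.1.contains "Species" = true
    · rw [if_pos hc, hfst]
    · rw [if_neg hc, hfst,
        erase_of_not_contains g _ (by rw [← hfst]; simpa using hc)]
  have hinfo : (if stA.2.contains "Species" then stA.2.erase "Species" else stA.2)
      = stA.2.erase "Species" := by
    by_cases hc : stA.2.contains "Species" = true
    · rw [if_pos hc]
    · rw [if_neg hc, erase_of_not_contains_int _ _ (by simpa using hc)]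
  have hinv' : pvInv (g.erase "Species") (stA.2.erase "Species") := by
    have h := inv_erase hinvA "Species"
    rw [hfst] at h
    exact h
  have hitems : (g.erase "Species").items
      = ((PySem.Set.ofList (data_set.map pvKey)).filter (fun k => !(k == "Species"))).map
          (fun k => (k, data_set.filter (fun row => pvKey row == k))) := by
    rw [items_erase, hg, modify_fold_items, List.filter_map]
    rfl
  refine Prod.ext ?_ ?_
  · show (if stA.1.contains "Species" then stA.1.erase "Species" else stA.1).items = _
    rw [hsep, hitems]
  · show (if stA.2.contains "Species" then stA.2.erase "Species" else stA.2).items = _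
    rw [hinfo]
    have hlen : (stA.2.erase "Species").items = (g.erase "Species").items.map pvLen := hinv'
    rw [hlen, hitems]
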